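-- pv_equiv track=rewrite | github.com/paltmey/masterthesis | scripts/fetch_github_top_repos.py | get_next_name
-- ===== SOURCE A (Python) =====
-- def get_next_name(name):
--     for i in range(len(name) - 1, -1, -1):
--         if name[i] == 'z':
--             name = name[:i]
--         else:
--             name = name[:i] + chr(ord(name[i]) + 1) + name[i + 1:]
--             return name
--
--     return None
-- ===== SOURCE B (Python) =====
-- def get_next_name(name):
--     j = -1
--     for i, c in enumerate(name):
--         if c != 'z':
--             j = i
--     if j < 0:
--         return None
--     return name[:j] + chr(ord(name[j]) + 1)
-- ===== Notes on version B (the rewrite author's own statement) =====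
-- stated objective: alternative
-- what changed: B scans the string forward once, tracking the index of the last non-'z' character, then does a single slice-and-increment; A loops right-to-left reslicing the string at every trailing 'z'.
import Mathlib
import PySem

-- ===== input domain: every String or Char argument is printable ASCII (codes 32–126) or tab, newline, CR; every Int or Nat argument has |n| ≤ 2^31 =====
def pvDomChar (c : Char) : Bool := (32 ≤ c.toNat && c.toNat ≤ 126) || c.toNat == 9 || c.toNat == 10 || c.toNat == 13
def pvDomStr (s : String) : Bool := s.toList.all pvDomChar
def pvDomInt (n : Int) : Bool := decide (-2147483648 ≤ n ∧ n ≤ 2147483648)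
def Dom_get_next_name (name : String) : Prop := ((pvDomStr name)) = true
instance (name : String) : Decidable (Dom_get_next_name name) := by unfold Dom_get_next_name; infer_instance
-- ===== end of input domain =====

-- B scans forward once tracking the last non-'z' index, then slices and increments once,
-- instead of A's right-to-left loop that reslices the string at every trailing 'z' (objective: alternative).


-- ===== PORT A =====
-- the loop: i counts down from len(name)-1; name shrinks by one on every 'z', so the
-- fuel argument is i+1 and name[:i] / name[i+1:] are Python slices of the CURRENT name
def get_next_name_go : List Char → Nat → Option (List Char)
  | _, 0 => none
  | name, i + 1 =>
    match PySem.List.pyGet? name (i : Int) with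
    | none => none   -- unreachable: i = len(name) - 1 throughout the loop
    | some c =>
      if c = 'z' then
        get_next_name_go (PySem.List.slice name none (some (i : Int))) i
      else
        some (PySem.List.slice name none (some (i : Int)) ++ [Char.ofNat (c.toNat + 1)]
              ++ PySem.List.slice name (some ((i : Int) + 1)) none)

def get_next_name (name : String) : Option String :=
  (get_next_name_go name.toList name.toList.length).map String.mk

-- ===== PORT B =====
-- j = -1; for i, c in enumerate(name): if c != 'z': j = i
-- then None if j < 0 else name[:j] + chr(ord(name[j]) + 1)
def get_next_name_alt (name : String) : Option String :=
  let j := (PySem.List.enumerate name.toList 0).foldl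
             (fun j p => if p.2 ≠ 'z' then p.1 else j) (-1 : Int)
  if j < 0 then none
  else
    match PySem.List.pyGet? name.toList j with
    | none => none   -- unreachable totality guard: j is a valid index when j ≥ 0
    | some c =>
      some (String.mk (PySem.List.slice name.toList none (some j) ++ [Char.ofNat (c.toNat + 1)]))

-- ===== PRECONDITION & SPEC =====
def Spec_get_next_name (name : String) (out : Option String) : Prop := out = get_next_name_alt name
instance (name : String) (out : Option String) : Decidable (Spec_get_next_name name out) := by unfold Spec_get_next_name; infer_instance

-- ===== CLAIM =====
def Claim_equal_get_next_name : Prop := ∀ (name : String), Dom_get_next_name name → Spec_get_next_name name (get_next_name name)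

-- ===== LEMMAS AND PROOFS =====
-- A's loop equals the closed 'drop trailing z, increment last' form.
theorem get_next_name_go_eq (l : List Char) :
    get_next_name_go l l.length =
      (match l.reverse.dropWhile (· == 'z') with
       | [] => none
       | c :: rest => some (rest.reverse ++ [Char.ofNat (c.toNat + 1)])) := by
  induction l using List.reverseRecOn with
  | nil => rfl
  | append_singleton xs x ih =>
    by_cases hx : x = 'z'
    · subst hx
      simpa [get_next_name_go, PySem.List.pyGet?_append_length,
             PySem.List.slice_to_natCast] using ih
    · have hx' : (x == 'z') = false := by simpa using hx
      have hdrop : PySem.List.slice (xs ++ [x]) (some ((xs.length : Int) + 1)) none = [] := by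
        have hcast : ((xs.length : Int) + 1) = ((xs.length + 1 : Nat) : Int) := by push_cast; ring
        rw [hcast, PySem.List.slice_from_natCast]
        simp
      simp [get_next_name_go,
            PySem.List.slice_to_natCast, hx, hx', hdrop]

-- B's forward fold computes (length of the trailing-z-stripped reversal) - 1.
theorem foldl_last_nonz (l : List Char) :
    (PySem.List.enumerate l 0).foldl (fun j p => if p.2 ≠ 'z' then p.1 else j) (-1 : Int)
      = ((l.reverse.dropWhile (· == 'z')).length : Int) - 1 := by
  induction l using List.reverseRecOn with
  | nil => rfl
  | append_singleton xs x ih =>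
    rw [PySem.List.enumerate_append, List.foldl_append]
    by_cases hx : x = 'z'
    · subst hx
      simpa using ih
    · have hx' : (x == 'z') = false := by simpa using hx
      simp [PySem.List.enumerate, hx, hx']

-- B equals the same closed form.
theorem get_next_name_alt_eq (name : String) :
    get_next_name_alt name =
      (match name.toList.reverse.dropWhile (· == 'z') with
       | [] => none
       | c :: rest => some (String.mk (rest.reverse ++ [Char.ofNat (c.toNat + 1)]))) := by
  unfold get_next_name_alt
  rw [foldl_last_nonz]
  rcases hd : name.toList.reverse.dropWhile (· == 'z') with _ | ⟨c, rest⟩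
  · simp
  · have hsplit : name.toList = rest.reverse ++ c :: (name.toList.reverse.takeWhile (· == 'z')).reverse := by
      have h := List.takeWhile_append_dropWhile (p := (· == 'z')) (l := name.toList.reverse)
      calc name.toList = name.toList.reverse.reverse := by simp
        _ = (name.toList.reverse.takeWhile (· == 'z') ++ name.toList.reverse.dropWhile (· == 'z')).reverse := by rw [h]
        _ = _ := by rw [hd]; simp
    have hnot : ¬ (((rest.length + 1 : Nat) : Int) - 1 < 0) := by push_cast; omega
    have hcast : ((rest.length + 1 : Nat) : Int) - 1 = ((rest.length : Nat) : Int) := by push_cast; ring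
    have hget : PySem.List.pyGet? name.toList ((rest.length : Nat) : Int) = some c := by
      conv_lhs => rw [hsplit]
      have : rest.length = rest.reverse.length := by simp
      rw [this]
      exact PySem.List.pyGet?_append_length _ _ _
    have hslice : PySem.List.slice name.toList none (some ((rest.length : Nat) : Int)) = rest.reverse := by
      rw [PySem.List.slice_to_natCast, hsplit]
      rw [List.take_append_of_le_length (by simp)]
      simp
    simp only [List.length_cons, hcast, hget, hslice]
    rw [if_neg (by omega)]

-- ===== VERDICT =====
theorem get_next_name_spec : Claim_equal_get_next_name := by
  intro name _
  unfold Spec_get_next_name get_next_name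
  rw [get_next_name_go_eq, get_next_name_alt_eq]
  cases name.toList.reverse.dropWhile (· == 'z') <;> rfl
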